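-- pv_equiv track=rewrite | github.com/mhaz/SCEI-statistics | src/stats_generales/2016/parse_general_2016.py | sanitize_number
-- ===== SOURCE A (Python) =====
-- def sanitize_number(s):
--     replace_to = {}
--     replace_to[","] = "."
--     replace_to["%"] = ""
--     replace_to["*"] = ""
--     for key, value in replace_to.items():
--         while key in s:
--             s = s.replace(key, value)
--     return s
-- ===== SOURCE B (Python) =====
-- def sanitize_number(s):
--     replace_to = {",": ".", "%": "", "*": ""}
--     return "".join(replace_to.get(c, c) for c in s)
-- ===== Notes on version B (the rewrite author's own statement) =====
-- stated objective: simpler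
-- what changed: A loops over the replacement rules doing repeated whole-string scan-and-replace passes; B makes a single pass over the characters of s, emitting each character's mapped value (dropping those mapped to the empty string).
import Mathlib
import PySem

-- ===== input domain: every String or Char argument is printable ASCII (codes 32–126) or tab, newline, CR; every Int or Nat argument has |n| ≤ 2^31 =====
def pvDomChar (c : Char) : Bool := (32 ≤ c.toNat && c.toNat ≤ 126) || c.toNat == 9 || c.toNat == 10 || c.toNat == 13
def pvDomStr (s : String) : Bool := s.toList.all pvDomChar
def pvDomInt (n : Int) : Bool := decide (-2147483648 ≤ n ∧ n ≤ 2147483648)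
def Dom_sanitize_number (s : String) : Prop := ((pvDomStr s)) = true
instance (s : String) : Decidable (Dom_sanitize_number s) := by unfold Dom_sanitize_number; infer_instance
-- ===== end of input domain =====

-- B replaces A's loop over replacement rules (repeated whole-string replace passes) by a single
-- pass over the characters of s with a per-character dict lookup; objective: simpler.

-- ===== PORT A =====
-- 'while key in s: s = s.replace(key, value)' — fueled recursion; any fuel ≥ len(s)+1 suffices
-- because s.replace removes every occurrence of key (proved below), so the loop body runs at most once.
def pvWhileReplace : Nat → String → String → String → String
  | 0, _, _, s => s
  | (fuel+1), key, value, s =>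
      if PySem.Str.isIn key s then pvWhileReplace fuel key value (PySem.Str.replace s key value) else s

def sanitize_number (s : String) : String :=
  let replace_to : PySem.Dict String String :=
    ((PySem.Dict.empty.insert "," ".").insert "%" "").insert "*" ""
  replace_to.items.foldl (fun t kv => pvWhileReplace (t.length + 1) kv.1 kv.2 t) s

-- ===== PORT B =====
def sanitize_number_alt (s : String) : String :=
  let replace_to : PySem.Dict String String :=
    PySem.Dict.ofList [(",", "."), ("%", ""), ("*", "")]
  PySem.Str.join ""
    (s.toList.map (fun c => replace_to.getD (String.ofList [c]) (String.ofList [c])))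

-- ===== PRECONDITION & SPEC =====
def Spec_sanitize_number (s : String) (out : String) : Prop := out = sanitize_number_alt s
instance (s : String) (out : String) : Decidable (Spec_sanitize_number s out) := by unfold Spec_sanitize_number; infer_instance

-- ===== CLAIM (what is proved, stated in full; the proofs are below) =====
def Claim_equal_sanitize_number : Prop := ∀ (s : String), Dom_sanitize_number s → Spec_sanitize_number s (sanitize_number s)

-- ===== LEMMAS AND PROOFS =====

theorem go_single (c : Char) (v : List Char) : ∀ (fuel : Nat) (l acc : List Char), l.length ≤ fuel →
    PySem.Chars.replace.go [c] v fuel l acc = acc.reverse ++ l.flatMap (fun x => if x = c then v else [x]) := by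
  intro fuel
  induction fuel with
  | zero => intro l acc h; rw [List.length_eq_zero_iff.mp (Nat.le_zero.mp h)]; simp [PySem.Chars.replace.go]
  | succ n ih =>
    intro l acc h
    cases l with
    | nil => simp [PySem.Chars.replace.go]
    | cons x t =>
      rw [PySem.Chars.replace.go]
      by_cases hx : x = c
      · subst hx
        simp only [List.isPrefixOf, BEq.rfl, Bool.true_and, if_pos]
        rw [show List.drop [x].length (x::t) = t from rfl, ih t (v.reverse ++ acc) (by simpa using h)]
        simp
      · have hp : List.isPrefixOf [c] (x :: t) = false := by
          simp [List.isPrefixOf]; exact fun hc => absurd hc.symm hx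
        rw [hp]
        simp only [Bool.false_eq_true, if_false]
        rw [ih t (x :: acc) (by simpa using h)]
        simp [hx]

theorem replace_single (c : Char) (v : List Char) (l : List Char) :
    PySem.Chars.replace l [c] v = l.flatMap (fun x => if x = c then v else [x]) := by
  rw [PySem.Chars.replace]
  simp only [List.isEmpty_cons, Bool.false_eq_true, if_false]
  simpa using go_single c v l.length l [] le_rfl

theorem singleton_infix_iff (c : Char) (m : List Char) : [c] <:+: m ↔ c ∈ m := by
  constructor
  · intro h; exact h.subset (List.mem_singleton_self c)
  · intro h; obtain ⟨a, b, rfl⟩ := List.append_of_mem h; exact ⟨a, b, by simp⟩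

theorem isIn_single_false (c : Char) (s : String) (h : c ∉ s.toList) :
    PySem.Str.isIn (String.ofList [c]) s = false := by
  rw [PySem.Str.isIn_eq]
  rw [PySem.Chars.isIn_eq_false_iff]
  rw [String.toList_ofList, singleton_infix_iff]
  exact h

theorem isIn_single_true (c : Char) (s : String) (h : c ∈ s.toList) :
    PySem.Str.isIn (String.ofList [c]) s = true := by
  rw [PySem.Str.isIn_eq, PySem.Chars.isIn_iff_infix, String.toList_ofList, singleton_infix_iff]
  exact h

theorem flatMap_no_c (c : Char) (v : List Char) (hv : c ∉ v) (l : List Char) :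
    c ∉ l.flatMap (fun x => if x = c then v else [x]) := by
  intro hmem
  rw [List.mem_flatMap] at hmem
  obtain ⟨x, _, hx⟩ := hmem
  by_cases h : x = c
  · rw [if_pos h] at hx; exact hv hx
  · rw [if_neg h] at hx; exact h (List.mem_singleton.mp hx).symm

theorem flatMap_id_of_no_c (c : Char) (v : List Char) (l : List Char) (h : c ∉ l) :
    l.flatMap (fun x => if x = c then v else [x]) = l := by
  induction l with
  | nil => rfl
  | cons x t ih =>
    simp only [List.mem_cons, not_or] at h
    rw [List.flatMap_cons, if_neg (fun hh => h.1 hh.symm), ih h.2]; rfl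

-- one while-loop over a single-char key whose replacement does not contain the key
theorem while_single (c : Char) (value s : String) (hv : c ∉ value.toList) (n : Nat) :
    pvWhileReplace (n+1) (String.ofList [c]) value s
      = String.ofList (s.toList.flatMap (fun x => if x = c then value.toList else [x])) := by
  rw [pvWhileReplace]
  by_cases hc : c ∈ s.toList
  · rw [isIn_single_true c s hc, if_pos rfl]
    have hrep : (PySem.Str.replace s (String.ofList [c]) value).toList
        = s.toList.flatMap (fun x => if x = c then value.toList else [x]) := by
      rw [PySem.Str.toList_replace, String.toList_ofList, replace_single]
    have hno : c ∉ (PySem.Str.replace s (String.ofList [c]) value).toList := by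
      rw [hrep]; exact flatMap_no_c c value.toList hv s.toList
    cases n with
    | zero => rw [pvWhileReplace, ← hrep, String.ofList_toList]
    | succ m =>
      rw [pvWhileReplace, isIn_single_false c _ hno]
      simp only [Bool.false_eq_true, if_false]
      rw [← hrep, String.ofList_toList]
  · rw [isIn_single_false c s hc]
    simp only [Bool.false_eq_true, if_false]
    rw [flatMap_id_of_no_c c value.toList s.toList hc, String.ofList_toList]

theorem intercalate_nil (cs : List (List Char)) : ([] : List Char).intercalate cs = cs.flatten := by
  induction cs with
  | nil => rfl
  | cons h t ih =>
    cases t with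
    | nil => simp [List.intercalate]
    | cons h2 t2 => simpa [List.intercalate, List.intersperse] using ih

-- the per-character value B emits
theorem getD_char (c : Char) :
    ((PySem.Dict.ofList [((",":String), ("." : String)), ("%", ""), ("*", "")]).getD
        (String.ofList [c]) (String.ofList [c])).toList
      = if c = ',' then ['.'] else if c = '%' then [] else if c = '*' then [] else [c] := by
  by_cases h1 : c = ','
  · subst h1; decide
  · by_cases h2 : c = '%'
    · subst h2; decide
    · by_cases h3 : c = '*'
      · subst h3; decide
      · rw [if_neg h1, if_neg h2, if_neg h3]
        rw [PySem.Dict.getD_of_not_contains, String.toList_ofList]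
        rw [PySem.Dict.contains_eq_decide_mem_keys]
        rw [show (PySem.Dict.ofList [((",":String), ("." : String)), ("%", ""), ("*", "")]).keys = [",", "%", "*"] from rfl]
        simp only [List.mem_cons, List.not_mem_nil, or_false, decide_eq_false_iff_not, not_or]
        exact ⟨fun h => h1 (by have := congrArg String.toList h; simpa using this),
               fun h => h2 (by have := congrArg String.toList h; simpa using this),
               fun h => h3 (by have := congrArg String.toList h; simpa using this)⟩

theorem alt_toList (s : String) :
    (sanitize_number_alt s).toList
      = s.toList.flatMap (fun c => if c = ',' then ['.'] else if c = '%' then [] else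
          if c = '*' then [] else [c]) := by
  unfold sanitize_number_alt
  rw [PySem.Str.toList_join]
  show PySem.Chars.join [] _ = _
  rw [PySem.Chars.join, intercalate_nil, List.map_map]
  simp only [Function.comp_def, getD_char]
  simp [List.flatMap_def]

-- A's three whole-string passes, fused into B's single per-character map
theorem compose_three (l : List Char) :
    ((l.flatMap (fun x => if x = ',' then ['.'] else [x])).flatMap
        (fun x => if x = '%' then ([] : List Char) else [x])).flatMap
        (fun x => if x = '*' then ([] : List Char) else [x])
      = l.flatMap (fun c => if c = ',' then ['.'] else if c = '%' then [] else
          if c = '*' then [] else [c]) := by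
  simp only [List.flatMap_assoc]
  refine List.flatMap_congr (fun x _ => ?_)
  by_cases h1 : x = ','
  · subst h1; decide
  · by_cases h2 : x = '%'
    · subst h2; decide
    · by_cases h3 : x = '*'
      · subst h3; decide
      · simp [h1, h2, h3]

-- ===== VERDICT (by name: the statement is the Claim_ definition above) =====
set_option maxHeartbeats 1600000 in
theorem sanitize_number_spec : Claim_equal_sanitize_number := by
  intro s _
  show sanitize_number s = sanitize_number_alt s
  have hA : sanitize_number s =
      pvWhileReplace ((pvWhileReplace ((pvWhileReplace (s.length + 1) "," "." s).length + 1)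
        "%" "" (pvWhileReplace (s.length + 1) "," "." s)).length + 1) "*" ""
        (pvWhileReplace ((pvWhileReplace (s.length + 1) "," "." s).length + 1)
          "%" "" (pvWhileReplace (s.length + 1) "," "." s)) := rfl
  rw [hA]
  rw [show ("," : String) = String.ofList [','] from rfl,
      show ("%" : String) = String.ofList ['%'] from rfl,
      show ("*" : String) = String.ofList ['*'] from rfl]
  rw [while_single ',' "." s (by decide) _]
  rw [while_single '%' "" _ (by decide) _]
  rw [while_single '*' "" _ (by decide) _]
  simp only [String.toList_ofList]
  rw [show ("." : String).toList = ['.'] from rfl, show ("" : String).toList = ([] : List Char) from rfl]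
  rw [compose_three s.toList, ← alt_toList s, String.ofList_toList]
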